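-- pv_equiv track=rewrite | github.com/Koddulfsen/vibe-ai | agents/intelligent-task-agent.py | _find_missing_dependencies
-- ===== SOURCE A (Python) =====
-- from typing import Dict, List, Optional, Set, Tuple
--
-- def _find_missing_dependencies(task_text: str, existing_deps: Set[str]) -> List[str]:
--     """Find dependencies that should be installed but aren't"""
--     missing = []
--
--     # Check for barcode scanning
--     if any(word in task_text for word in ['barcode', 'scanner', 'camera']):
--         if not any(dep in existing_deps for dep in ['html5-qrcode', 'quagga']):
--             missing.append('html5-qrcode')
--
--     # Check for API client
--     if 'api' in task_text and not any(dep in existing_deps for dep in ['axios', 'fetch']):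
--         missing.append('axios')
--
--     # Check for offline storage
--     if 'offline' in task_text or 'cache' in task_text:
--         if not any(dep in existing_deps for dep in ['dexie', 'idb']):
--             missing.append('dexie')
--
--     # Check for testing
--     if 'test' in task_text:
--         if '@testing-library/react' not in existing_deps:
--             missing.append('@testing-library/react')
--
--     return missing
-- ===== SOURCE B (Python) =====
-- # B: inverted-index approach — a flat keyword->package map marks triggered
-- # packages, one pass over existing_deps through a blocker->package index marks
-- # satisfied packages, and a canonical order list produces the result.
-- KEYWORD_PKG = [('barcode', 'html5-qrcode'), ('scanner', 'html5-qrcode'),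
--                ('camera', 'html5-qrcode'), ('api', 'axios'),
--                ('offline', 'dexie'), ('cache', 'dexie'),
--                ('test', '@testing-library/react')]
-- BLOCKER_PKG = {'html5-qrcode': 'html5-qrcode', 'quagga': 'html5-qrcode',
--                'axios': 'axios', 'fetch': 'axios',
--                'dexie': 'dexie', 'idb': 'dexie',
--                '@testing-library/react': '@testing-library/react'}
-- ORDER = ['html5-qrcode', 'axios', 'dexie', '@testing-library/react']
--
--
-- def _triggered(task_text):
--     return {pkg for kw, pkg in KEYWORD_PKG if kw in task_text}
--
--
-- def _satisfied(existing_deps):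
--     return {BLOCKER_PKG[d] for d in existing_deps if d in BLOCKER_PKG}
--
--
-- def _find_missing_dependencies(task_text, existing_deps):
--     """Find dependencies that should be installed but aren't."""
--     t = _triggered(task_text)
--     s = _satisfied(existing_deps)
--     return [p for p in ORDER if p in t and p not in s]
-- ===== Notes on version B (the rewrite author's own statement) =====
-- stated objective: alternative
-- what changed: Instead of four hard-coded branch blocks each scanning its blockers, B builds a triggered-package set from a flat keyword->package map, marks satisfied packages in one pass over existing_deps through a blocker->package index, and emits the canonical package order filtered by triggered-and-not-satisfied.
import Mathlib
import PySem

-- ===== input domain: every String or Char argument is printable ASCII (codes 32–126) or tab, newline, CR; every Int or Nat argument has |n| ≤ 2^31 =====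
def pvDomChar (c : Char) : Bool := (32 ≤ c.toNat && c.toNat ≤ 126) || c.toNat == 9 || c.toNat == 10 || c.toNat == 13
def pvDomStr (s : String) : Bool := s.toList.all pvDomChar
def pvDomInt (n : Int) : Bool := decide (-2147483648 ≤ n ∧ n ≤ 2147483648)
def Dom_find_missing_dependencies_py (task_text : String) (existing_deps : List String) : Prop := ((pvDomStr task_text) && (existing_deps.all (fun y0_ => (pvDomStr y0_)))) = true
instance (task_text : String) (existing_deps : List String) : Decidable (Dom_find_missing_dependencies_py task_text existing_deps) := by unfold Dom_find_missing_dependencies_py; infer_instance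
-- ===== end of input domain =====

-- B replaces A's four hard-coded branch blocks by an inverted-index pipeline (keyword->package
-- map, one pass over existing_deps through a blocker->package index, canonical order filter);
-- objective: alternative structure, same cost.

-- ===== PORT A =====
-- Literal port of A: four hard-coded if-blocks appending to `missing` in order.
def find_missing_dependencies_py (task_text : String) (existing_deps : List String) : List String :=
  let missing : List String := []
  let missing := if (["barcode", "scanner", "camera"].any (fun w => PySem.Str.isIn w task_text)) then
      (if !(["html5-qrcode", "quagga"].any (fun d => existing_deps.contains d)) then
        missing ++ ["html5-qrcode"] else missing)
    else missing
  let missing := if PySem.Str.isIn "api" task_text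
      && !(["axios", "fetch"].any (fun d => existing_deps.contains d)) then
      missing ++ ["axios"] else missing
  let missing := if (PySem.Str.isIn "offline" task_text || PySem.Str.isIn "cache" task_text) then
      (if !(["dexie", "idb"].any (fun d => existing_deps.contains d)) then
        missing ++ ["dexie"] else missing)
    else missing
  let missing := if PySem.Str.isIn "test" task_text then
      (if !(existing_deps.contains "@testing-library/react") then
        missing ++ ["@testing-library/react"] else missing)
    else missing
  missing

-- ===== PORT B =====
-- B: keyword->package flat map, blocker->package index, canonical order list.
def pvKeywordPkg : List (String × String) :=
  [("barcode", "html5-qrcode"), ("scanner", "html5-qrcode"), ("camera", "html5-qrcode"),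
   ("api", "axios"), ("offline", "dexie"), ("cache", "dexie"),
   ("test", "@testing-library/react")]

def pvBlockerPkg : PySem.Dict String String :=
  PySem.Dict.ofList
    [("html5-qrcode", "html5-qrcode"), ("quagga", "html5-qrcode"),
     ("axios", "axios"), ("fetch", "axios"),
     ("dexie", "dexie"), ("idb", "dexie"),
     ("@testing-library/react", "@testing-library/react")]

def pvOrder : List String := ["html5-qrcode", "axios", "dexie", "@testing-library/react"]

-- {pkg for kw, pkg in KEYWORD_PKG if kw in task_text}
def pvTriggered (task_text : String) : PySem.Set String :=
  PySem.Set.ofList ((pvKeywordPkg.filter (fun kv => PySem.Str.isIn kv.1 task_text)).map Prod.snd)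

-- {BLOCKER_PKG[d] for d in existing_deps if d in BLOCKER_PKG}
def pvSatisfied (existing_deps : List String) : PySem.Set String :=
  PySem.Set.ofList (existing_deps.filterMap (fun d => PySem.Dict.get? pvBlockerPkg d))

def find_missing_dependencies_py_alt (task_text : String) (existing_deps : List String) : List String :=
  let t := pvTriggered task_text
  let s := pvSatisfied existing_deps
  pvOrder.filter (fun p => PySem.Set.contains t p && !(PySem.Set.contains s p))

-- ===== PRECONDITION & SPEC =====
def Spec_find_missing_dependencies_py (task_text : String) (existing_deps : List String) (out : List String) : Prop := out = find_missing_dependencies_py_alt task_text existing_deps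
instance (task_text : String) (existing_deps : List String) (out : List String) : Decidable (Spec_find_missing_dependencies_py task_text existing_deps out) := by unfold Spec_find_missing_dependencies_py; infer_instance

-- ===== CLAIM (what is proved, stated in full; the proofs are below) =====
def Claim_equal_find_missing_dependencies_py : Prop := ∀ (task_text : String) (existing_deps : List String), Dom_find_missing_dependencies_py task_text existing_deps → Spec_find_missing_dependencies_py task_text existing_deps (find_missing_dependencies_py task_text existing_deps)

-- ===== LEMMAS AND PROOFS =====
theorem pv_trig (t : String) (p : String) :
    PySem.Set.contains (pvTriggered t) p
      = (pvKeywordPkg.any (fun kv => kv.2 == p && PySem.Str.isIn kv.1 t)) := by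
  rw [Bool.eq_iff_iff]
  simp [pvTriggered, PySem.Set.mem_ofList, List.mem_filter, List.any_eq_true]

theorem pv_sat (deps : List String) (p : String) :
    PySem.Set.contains (pvSatisfied deps) p
      = (deps.any (fun d => PySem.Dict.get? pvBlockerPkg d == some p)) := by
  rw [Bool.eq_iff_iff]
  simp [pvSatisfied, PySem.Set.mem_ofList, List.mem_filterMap, List.any_eq_true]

theorem pvBlockerPkg_eq : pvBlockerPkg = PySem.Dict.mk
    [("html5-qrcode", "html5-qrcode"), ("quagga", "html5-qrcode"),
     ("axios", "axios"), ("fetch", "axios"),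
     ("dexie", "dexie"), ("idb", "dexie"),
     ("@testing-library/react", "@testing-library/react")] := by decide

theorem pv_get_qr (d : String) :
    (PySem.Dict.get? pvBlockerPkg d == some "html5-qrcode")
      = (d == "html5-qrcode" || d == "quagga") := by
  rw [pvBlockerPkg_eq]
  simp only [PySem.Dict.get?_mk_cons]
  split_ifs <;> simp_all [PySem.Dict.get?] <;>
    first
      | (subst_vars; decide)
      | exact ⟨fun h => by simp_all, fun h => by simp_all⟩

theorem pv_get_ax (d : String) :
    (PySem.Dict.get? pvBlockerPkg d == some "axios")
      = (d == "axios" || d == "fetch") := by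
  rw [pvBlockerPkg_eq]
  simp only [PySem.Dict.get?_mk_cons]
  split_ifs <;> simp_all [PySem.Dict.get?] <;>
    first
      | (subst_vars; decide)
      | exact ⟨fun h => by simp_all, fun h => by simp_all⟩

theorem pv_get_dx (d : String) :
    (PySem.Dict.get? pvBlockerPkg d == some "dexie")
      = (d == "dexie" || d == "idb") := by
  rw [pvBlockerPkg_eq]
  simp only [PySem.Dict.get?_mk_cons]
  split_ifs <;> simp_all [PySem.Dict.get?] <;>
    first
      | (subst_vars; decide)
      | exact ⟨fun h => by simp_all, fun h => by simp_all⟩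

theorem pv_get_ts (d : String) :
    (PySem.Dict.get? pvBlockerPkg d == some "@testing-library/react")
      = (d == "@testing-library/react") := by
  rw [pvBlockerPkg_eq]
  simp only [PySem.Dict.get?_mk_cons]
  split_ifs <;> simp_all [PySem.Dict.get?] <;>
    first
      | (subst_vars; decide)
      | exact fun h => by simp_all

theorem any_or2 (deps : List String) (a b : String) :
    deps.any (fun d => d == a || d == b) = (deps.contains a || deps.contains b) := by
  rw [Bool.eq_iff_iff]
  simp [List.any_eq_true]
  constructor
  · rintro ⟨x, hx, h | h⟩ <;> [left; right] <;> exact h ▸ hx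
  · rintro (h | h) <;> exact ⟨_, h, by simp⟩

theorem any_one (deps : List String) (a : String) :
    deps.any (fun d => d == a) = deps.contains a := by
  rw [Bool.eq_iff_iff]
  simp [List.any_eq_true]

-- ===== VERDICT (by name: the statement is the Claim_ definition above) =====
theorem find_missing_dependencies_py_spec : Claim_equal_find_missing_dependencies_py := by
  intro t deps _
  unfold Spec_find_missing_dependencies_py find_missing_dependencies_py find_missing_dependencies_py_alt
  simp only [pv_trig, pv_sat, pvOrder, pvKeywordPkg, List.filter_cons, List.filter_nil,
    List.any_cons, List.any_nil, pv_get_qr, pv_get_ax, pv_get_dx, pv_get_ts]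
  simp only [beq_self_eq_true, Bool.true_and, Bool.false_and, Bool.or_false, Bool.false_or,
    String.reduceBEq, any_or2, any_one]
  cases h1 : (PySem.Str.isIn "barcode" t || (PySem.Str.isIn "scanner" t || PySem.Str.isIn "camera" t)) <;>
  cases h2 : (deps.contains "html5-qrcode" || deps.contains "quagga") <;>
  cases h3 : PySem.Str.isIn "api" t <;>
  cases h4 : (deps.contains "axios" || deps.contains "fetch") <;>
  cases h5 : (PySem.Str.isIn "offline" t || PySem.Str.isIn "cache" t) <;>
  cases h6 : (deps.contains "dexie" || deps.contains "idb") <;>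
  cases h7 : PySem.Str.isIn "test" t <;>
  cases h8 : deps.contains "@testing-library/react" <;>
  simp_all
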